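-- pv_equiv track=rewrite | github.com/zm-git-dev/RNApipeline | Trinity_extract_long_seq/extract_longest_isform.py | Stat_length
-- ===== SOURCE A (Python) =====
-- def Stat_length(transcript_len):
-- 	count_200,count_500,count_1000,count_2000=[0,0,0,0]
-- 	for trans_len in transcript_len:
-- 		trans_len=int(trans_len)
-- 		if 200 <= trans_len <500 :
-- 			count_200 =count_200 +1
-- 		if trans_len < 1000 and trans_len >=500:
-- 			count_500 = count_500 +1
-- 		if trans_len <2000 and trans_len >=1000:
-- 			count_1000 = count_1000 +1
-- 		if trans_len >=2000:
-- 			count_2000 = count_2000 +1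
-- 	total = len(transcript_len)
-- 	stat_list = [count_200,count_500,count_1000,count_2000,total]
-- 	return stat_list
-- ===== SOURCE B (Python) =====
-- def Stat_length(transcript_len):
--     s = sorted(int(x) for x in transcript_len)
--     n = len(s)
--
--     def count_less(v):
--         c = 0
--         for x in s:
--             if x < v:
--                 c += 1
--             else:
--                 break
--         return c
--
--     a = count_less(200)
--     b = count_less(500)
--     c = count_less(1000)
--     d = count_less(2000)
--     return [b - a, c - b, d - c, n - d, n]
-- ===== Notes on version B (the rewrite author's own statement) =====
-- stated objective: alternative
-- what changed: B sorts the lengths once and reads each bucket count as a difference of cut positions (count of elements below each boundary, found by scanning the sorted prefix), instead of A's single pass testing four ranges per element.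
import Mathlib
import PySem

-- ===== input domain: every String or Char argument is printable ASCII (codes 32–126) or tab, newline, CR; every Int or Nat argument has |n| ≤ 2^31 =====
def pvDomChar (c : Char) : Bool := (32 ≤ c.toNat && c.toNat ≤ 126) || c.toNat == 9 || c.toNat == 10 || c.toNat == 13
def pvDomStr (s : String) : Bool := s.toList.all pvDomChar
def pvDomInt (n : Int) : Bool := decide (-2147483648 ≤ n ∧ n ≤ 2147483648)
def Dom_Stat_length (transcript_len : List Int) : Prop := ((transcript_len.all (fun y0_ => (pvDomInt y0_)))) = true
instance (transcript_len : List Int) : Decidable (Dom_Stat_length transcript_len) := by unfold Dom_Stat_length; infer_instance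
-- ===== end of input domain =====

-- ===== PORT A =====
-- B replaces A's one-pass four-range count by sort-once-then-cut-positions (same results, similar cost).
-- A note on structure: A makes one pass testing four ranges per
-- element; B sorts once and reads each bucket as a difference of cut positions.
def Stat_length (transcript_len : List Int) : List Int :=
  let st := transcript_len.foldl
    (fun (st : Int × Int × Int × Int) trans_len =>
      -- trans_len = int(trans_len) is the identity on ints
      let st := if 200 ≤ trans_len ∧ trans_len < 500 then
        (st.1 + 1, st.2.1, st.2.2.1, st.2.2.2) else st
      let st := if trans_len < 1000 ∧ trans_len ≥ 500 then
        (st.1, st.2.1 + 1, st.2.2.1, st.2.2.2) else st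
      let st := if trans_len < 2000 ∧ trans_len ≥ 1000 then
        (st.1, st.2.1, st.2.2.1 + 1, st.2.2.2) else st
      let st := if trans_len ≥ 2000 then
        (st.1, st.2.1, st.2.2.1, st.2.2.2 + 1) else st
      st)
    (0, 0, 0, 0)
  [st.1, st.2.1, st.2.2.1, st.2.2.2, (transcript_len.length : Int)]

-- ===== PORT B =====
-- the 'for x in s: if x < v: c += 1 else: break' loop of Source B's count_less
def countLess (s : List Int) (v : Int) : Int :=
  match s with
  | [] => 0
  | x :: t => if x < v then countLess t v + 1 else 0

def Stat_length_alt (transcript_len : List Int) : List Int :=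
  let s := PySem.List.sorted transcript_len (fun x => x) false
  let n : Int := (s.length : Int)
  let a := countLess s 200
  let b := countLess s 500
  let c := countLess s 1000
  let d := countLess s 2000
  [b - a, c - b, d - c, n - d, n]

-- ===== PRECONDITION & SPEC =====
def Spec_Stat_length (transcript_len : List Int) (out : List Int) : Prop := out = Stat_length_alt transcript_len
instance (transcript_len : List Int) (out : List Int) : Decidable (Spec_Stat_length transcript_len out) := by unfold Spec_Stat_length; infer_instance

-- ===== CLAIM (what is proved, stated in full; the proofs are below) =====
def Claim_equal_Stat_length : Prop := ∀ (transcript_len : List Int), Dom_Stat_length transcript_len → Spec_Stat_length transcript_len (Stat_length transcript_len)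

-- ===== LEMMAS AND PROOFS =====

-- On a nondecreasing list, the break-at-first-failure count equals the full count.
theorem countLess_eq_countP (s : List Int) (v : Int)
    (h : s.Pairwise (· ≤ ·)) :
    countLess s v = (s.countP (fun x => decide (x < v)) : Int) := by
  induction s with
  | nil => simp [countLess]
  | cons x t ih =>
    rcases List.pairwise_cons.mp h with ⟨hx, ht⟩
    by_cases hxv : x < v
    · simp [countLess, hxv, ih ht]
    · have : t.countP (fun x => decide (x < v)) = 0 := by
        rw [List.countP_eq_zero]
        intro y hy
        simp only [decide_eq_true_eq]
        exact fun hyv => hxv (lt_of_le_of_lt (hx y hy) hyv)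
      simp [countLess, hxv, this]

-- A's fold with four counters, characterised by countP of A's four conditions.
theorem statA_foldl (l : List Int) (a b c d : Int) :
    l.foldl
      (fun (st : Int × Int × Int × Int) t =>
        let st := if 200 ≤ t ∧ t < 500 then
          (st.1 + 1, st.2.1, st.2.2.1, st.2.2.2) else st
        let st := if t < 1000 ∧ t ≥ 500 then
          (st.1, st.2.1 + 1, st.2.2.1, st.2.2.2) else st
        let st := if t < 2000 ∧ t ≥ 1000 then
          (st.1, st.2.1, st.2.2.1 + 1, st.2.2.2) else st
        let st := if t ≥ 2000 then
          (st.1, st.2.1, st.2.2.1, st.2.2.2 + 1) else st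
        st)
      (a, b, c, d)
    = (a + (l.countP (fun x => decide (200 ≤ x ∧ x < 500)) : Int),
       b + (l.countP (fun x => decide (x < 1000 ∧ x ≥ 500)) : Int),
       c + (l.countP (fun x => decide (x < 2000 ∧ x ≥ 1000)) : Int),
       d + (l.countP (fun x => decide (x ≥ 2000)) : Int)) := by
  induction l generalizing a b c d with
  | nil => simp
  | cons x t ih =>
    simp only [List.foldl_cons]
    by_cases hA : 200 ≤ x <;> by_cases hB : 500 ≤ x <;>
    by_cases hC : 1000 ≤ x <;> by_cases hD : 2000 ≤ x <;>
    first
    | (exfalso; omega)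
    | (simp [hA, hB, hC, hD, ge_iff_le, ih, Prod.mk.injEq,
         show x < 500 ↔ ¬500 ≤ x by omega,
         show x < 1000 ↔ ¬1000 ≤ x by omega,
         show x < 2000 ↔ ¬2000 ≤ x by omega] <;> omega)

-- A bucket count plus the count below its lower cut is the count below its upper cut.
theorem countP_band_add (l : List Int) (lo hi : Int) (hle : lo ≤ hi) :
    l.countP (fun x => decide (lo ≤ x ∧ x < hi)) + l.countP (fun x => decide (x < lo))
      = l.countP (fun x => decide (x < hi)) := by
  induction l with
  | nil => simp
  | cons x t ih =>
    simp only [List.countP_cons]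
    split_ifs <;> simp only [decide_eq_true_eq] at * <;> omega

-- Elements at or above the cut plus elements below it make the whole list.
theorem countP_ge_add (l : List Int) (lo : Int) :
    l.countP (fun x => decide (lo ≤ x)) + l.countP (fun x => decide (x < lo))
      = l.length := by
  induction l with
  | nil => simp
  | cons x t ih =>
    simp only [List.countP_cons, List.length_cons]
    split_ifs <;> simp only [decide_eq_true_eq] at * <;> omega

-- ===== VERDICT (by name: the statement is the Claim_ definition above) =====
theorem Stat_length_spec : Claim_equal_Stat_length := by
  intro l _
  unfold Spec_Stat_length Stat_length Stat_length_alt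
  have hperm := PySem.List.sorted_perm l (fun x : Int => x) false
  have hpw : (PySem.List.sorted l (fun x : Int => x) false).Pairwise (· ≤ ·) := by
    simpa using PySem.List.sorted_pairwise l (fun x : Int => x)
  have hcut : ∀ v : Int, countLess (PySem.List.sorted l (fun x : Int => x) false) v
      = (l.countP (fun x => decide (x < v)) : Int) := by
    intro v
    rw [countLess_eq_countP _ v hpw, hperm.countP_eq]
  have hlen : ((PySem.List.sorted l (fun x : Int => x) false).length : Int)
      = (l.length : Int) := by rw [hperm.length_eq]
  have e2 : l.countP (fun x => decide (x < 1000 ∧ x ≥ 500))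
      = l.countP (fun x => decide (500 ≤ x ∧ x < 1000)) :=
    List.countP_congr (fun x _ => by simp [ge_iff_le, and_comm])
  have e3 : l.countP (fun x => decide (x < 2000 ∧ x ≥ 1000))
      = l.countP (fun x => decide (1000 ≤ x ∧ x < 2000)) :=
    List.countP_congr (fun x _ => by simp [ge_iff_le, and_comm])
  have e4 : l.countP (fun x => decide (x ≥ 2000))
      = l.countP (fun x => decide (2000 ≤ x)) :=
    List.countP_congr (fun x _ => by simp [ge_iff_le])
  have b1 := countP_band_add l 200 500 (by norm_num)
  have b2 := countP_band_add l 500 1000 (by norm_num)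
  have b3 := countP_band_add l 1000 2000 (by norm_num)
  have b4 := countP_ge_add l 2000
  simp only [statA_foldl, zero_add, hcut, hlen, e2, e3, e4, List.cons.injEq, and_true]
  exact ⟨by omega, by omega, by omega, by omega⟩
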